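-- pv_equiv track=rewrite | github.com/Muhammad-Saaaad/Health-FHIR-HL7-Processing-Engine-with-client-Simulator | InterfaceEngine/api/endpoint.py | hl7_extract_paths
-- ===== SOURCE A (Python) =====
-- def hl7_extract_paths(segment):
--     """
--     Parse a single HL7 segment string and return all field/component/subcomponent paths.
--
--     Generates dot-notation paths such as:
--     - `PID-3` (simple field)
--     - `PID-5.1` (component within a field)
--     - `PID-5.1.2` (subcomponent within a component)
--
--     Args:
--         segment (str): A single HL7 segment string (e.g., "PID|1||12345^^^MR||Smith^John^A").
--
--     Returns:
--         tuple: (segment_type: str, paths: list[str])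
--             - `segment_type`: e.g., "PID", "MSH"
--             - `paths`: list of dot-notation path strings for all non-empty fields
--     """
--     paths = []
--
--     # for segment in segments[1:]
--     fields = segment.split('|')
--     segment_type = fields[0] # PID etc.
--     for i , field in enumerate(fields[1:], start=1):
--         if field == '':
--             continue
--         if '^' in field:
--             components = field.split('^')
--             for j, component in enumerate(components, start=1):
--                 if '&' in component:
--                     subcomponents = component.split('&')
--                     for k, subcomponent in enumerate(subcomponents, start=1):
--                         path = f"{segment_type}-{i}.{j}.{k}"
--                         paths.append(path)
--                 else:
--                     path = f"{segment_type}-{i}.{j}"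
--                     paths.append(path)
--         else:
--             path = f"{segment_type}-{i}"
--             paths.append(path)
--     return (segment_type, paths)
-- ===== SOURCE B (Python) =====
-- def hl7_extract_paths(segment):
--     """Recursive descent over the HL7 separator hierarchy instead of three
--     hand-unrolled nested loops."""
--     def emit(s, seps, prefix):
--         if seps and seps[0] in s:
--             return [p for j, piece in enumerate(s.split(seps[0]), start=1)
--                       for p in emit(piece, seps[1:], prefix + f".{j}")]
--         return [prefix]
--     fields = segment.split('|')
--     segment_type = fields[0]
--     paths = [p for i, field in enumerate(fields[1:], start=1) if field != ''
--                for p in emit(field, ['^', '&'], f"{segment_type}-{i}")]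
--     return (segment_type, paths)
-- ===== Notes on version B (the rewrite author's own statement) =====
-- stated objective: alternative
-- what changed: Replaces the three hand-unrolled nested loops (with an in-loop '&' check only under the '^' branch) by one recursive helper emit(s, seps, prefix) that descends the HL7 separator hierarchy ['^','&'], splitting on the first separator present and appending '.{j}' to the prefix at each level.
import Mathlib
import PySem

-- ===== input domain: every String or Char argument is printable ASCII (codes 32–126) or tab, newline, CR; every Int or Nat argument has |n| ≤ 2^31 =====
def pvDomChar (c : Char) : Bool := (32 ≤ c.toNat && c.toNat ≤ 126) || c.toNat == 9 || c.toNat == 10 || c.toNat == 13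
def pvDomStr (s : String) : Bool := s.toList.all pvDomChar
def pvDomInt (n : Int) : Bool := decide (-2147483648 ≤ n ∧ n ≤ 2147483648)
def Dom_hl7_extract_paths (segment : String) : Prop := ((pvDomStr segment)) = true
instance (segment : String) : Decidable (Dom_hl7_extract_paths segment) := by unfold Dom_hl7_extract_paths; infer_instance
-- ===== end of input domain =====

-- B replaces A's three hand-unrolled nested loops by one recursive helper
-- descending the HL7 separator hierarchy ['^','&'] (objective: alternative decomposition).

-- ===== PORT A =====
-- Literal port of A; strings handled on the List Char side (PySem.Chars), wrapped with
-- String.ofList at the very end. fields[0] is always defined: Chars.splitOn never returns [],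
-- so headD [] is exact and A is total (no Pre_).
def hl7_extract_paths (segment : String) : String × List String :=
  let fields := PySem.Chars.splitOn segment.toList ['|']
  let segment_type := fields.headD []
  let paths := (PySem.List.enumerate fields.tail 1).foldl
    (fun paths p =>
      let i := p.1
      let field := p.2
      if field = [] then paths
      else if PySem.Chars.isIn ['^'] field then
        (PySem.List.enumerate (PySem.Chars.splitOn field ['^']) 1).foldl
          (fun paths q =>
            let j := q.1
            let component := q.2
            if PySem.Chars.isIn ['&'] component then
              (PySem.List.enumerate (PySem.Chars.splitOn component ['&']) 1).foldl
                (fun paths r =>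
                  let k := r.1
                  paths ++ [segment_type ++ ['-'] ++ PySem.Int.toChars i ++ ['.'] ++
                            PySem.Int.toChars j ++ ['.'] ++ PySem.Int.toChars k]) paths
            else
              paths ++ [segment_type ++ ['-'] ++ PySem.Int.toChars i ++ ['.'] ++
                        PySem.Int.toChars j]) paths
      else
        paths ++ [segment_type ++ ['-'] ++ PySem.Int.toChars i]) []
  (String.ofList segment_type, paths.map String.ofList)

-- ===== PORT B =====
-- emit(s, seps, prefix): split on the first separator present and recurse, else the prefix is a leaf.
def pvEmit (s : List Char) (seps : List (List Char)) (pre : List Char) : List (List Char) :=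
  match seps with
  | [] => [pre]
  | sep :: rest =>
    if PySem.Chars.isIn sep s then
      (PySem.List.enumerate (PySem.Chars.splitOn s sep) 1).flatMap
        (fun q => pvEmit q.2 rest (pre ++ ['.'] ++ PySem.Int.toChars q.1))
    else [pre]

def hl7_extract_paths_alt (segment : String) : String × List String :=
  let fields := PySem.Chars.splitOn segment.toList ['|']
  let segment_type := fields.headD []
  let paths := (PySem.List.enumerate fields.tail 1).flatMap
    (fun p =>
      if p.2 = [] then []
      else pvEmit p.2 [['^'], ['&']] (segment_type ++ ['-'] ++ PySem.Int.toChars p.1))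
  (String.ofList segment_type, paths.map String.ofList)

-- ===== PRECONDITION & SPEC =====
def Spec_hl7_extract_paths (segment : String) (out : String × List String) : Prop := out = hl7_extract_paths_alt segment
instance (segment : String) (out : String × List String) : Decidable (Spec_hl7_extract_paths segment out) := by unfold Spec_hl7_extract_paths; infer_instance

-- ===== CLAIM (what is proved, stated in full; the proofs are below) =====
def Claim_equal_hl7_extract_paths : Prop := ∀ (segment : String), Dom_hl7_extract_paths segment → Spec_hl7_extract_paths segment (hl7_extract_paths segment)

-- ===== LEMMAS AND PROOFS =====

-- general: flatMap of singletons is a map (no named library lemma closes this)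
theorem pvFlatMap_singleton {α β : Type} (f : α → β) (l : List α) :
    (l.flatMap fun x => [f x]) = l.map f := by
  induction l with
  | nil => rfl
  | cons a l ih => simp [ih]

-- A's '^'-level body (for one field) equals emit on the separator list ['^','&'].
theorem pvEmit_eq_inner (st : List Char) (i : Int) (field : List Char) :
    pvEmit field [['^'], ['&']] (st ++ ['-'] ++ PySem.Int.toChars i) =
      (if PySem.Chars.isIn ['^'] field then
        (PySem.List.enumerate (PySem.Chars.splitOn field ['^']) 1).flatMap
          (fun q =>
            if PySem.Chars.isIn ['&'] q.2 then
              (PySem.List.enumerate (PySem.Chars.splitOn q.2 ['&']) 1).map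
                (fun r => st ++ ['-'] ++ PySem.Int.toChars i ++ ['.'] ++
                          PySem.Int.toChars q.1 ++ ['.'] ++ PySem.Int.toChars r.1)
            else [st ++ ['-'] ++ PySem.Int.toChars i ++ ['.'] ++ PySem.Int.toChars q.1])
      else [st ++ ['-'] ++ PySem.Int.toChars i]) := by
  simp only [pvEmit]
  split_ifs with h1
  · refine List.flatMap_congr ?_
    intro q _
    split_ifs with h2
    · rw [pvFlatMap_singleton]
    · simp [List.append_assoc]
  · rfl

-- A's innermost/middle foldls rewritten to "acc ++ …", then the outer foldl to a flatMap.
theorem hl7_foldl_eq_flatMap (st : List Char) (l : List (Int × List Char)) (acc : List (List Char)) :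
    l.foldl
      (fun paths p =>
        let i := p.1
        let field := p.2
        if field = [] then paths
        else if PySem.Chars.isIn ['^'] field then
          (PySem.List.enumerate (PySem.Chars.splitOn field ['^']) 1).foldl
            (fun paths q =>
              let j := q.1
              let component := q.2
              if PySem.Chars.isIn ['&'] component then
                (PySem.List.enumerate (PySem.Chars.splitOn component ['&']) 1).foldl
                  (fun paths r =>
                    let k := r.1
                    paths ++ [st ++ ['-'] ++ PySem.Int.toChars i ++ ['.'] ++
                              PySem.Int.toChars j ++ ['.'] ++ PySem.Int.toChars k]) paths
              else
                paths ++ [st ++ ['-'] ++ PySem.Int.toChars i ++ ['.'] ++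
                          PySem.Int.toChars j]) paths
        else
          paths ++ [st ++ ['-'] ++ PySem.Int.toChars i]) acc
    = acc ++ l.flatMap
        (fun p =>
          if p.2 = [] then []
          else pvEmit p.2 [['^'], ['&']] (st ++ ['-'] ++ PySem.Int.toChars p.1)) := by
  induction l generalizing acc with
  | nil => simp
  | cons p rest ih =>
    simp only [List.foldl_cons, List.flatMap_cons, ih]
    rw [← List.append_assoc]
    congr 1
    rw [pvEmit_eq_inner st p.1 p.2]
    by_cases hE : p.2 = []
    · simp [hE]
    · simp only [if_neg hE]
      by_cases h1 : PySem.Chars.isIn ['^'] p.2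
      · simp only [if_pos h1]
        -- middle foldl: each branch is acc ++ (something), so it is a flatMap
        have step : ∀ (acc2 : List (List Char)),
            (PySem.List.enumerate (PySem.Chars.splitOn p.2 ['^']) 1).foldl
              (fun paths q =>
                if PySem.Chars.isIn ['&'] q.2 then
                  (PySem.List.enumerate (PySem.Chars.splitOn q.2 ['&']) 1).foldl
                    (fun paths r =>
                      paths ++ [st ++ ['-'] ++ PySem.Int.toChars p.1 ++ ['.'] ++
                                PySem.Int.toChars q.1 ++ ['.'] ++ PySem.Int.toChars r.1]) paths
                else
                  paths ++ [st ++ ['-'] ++ PySem.Int.toChars p.1 ++ ['.'] ++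
                            PySem.Int.toChars q.1]) acc2
            = acc2 ++ (PySem.List.enumerate (PySem.Chars.splitOn p.2 ['^']) 1).flatMap
                (fun q =>
                  if PySem.Chars.isIn ['&'] q.2 then
                    (PySem.List.enumerate (PySem.Chars.splitOn q.2 ['&']) 1).map
                      (fun r => st ++ ['-'] ++ PySem.Int.toChars p.1 ++ ['.'] ++
                                PySem.Int.toChars q.1 ++ ['.'] ++ PySem.Int.toChars r.1)
                  else [st ++ ['-'] ++ PySem.Int.toChars p.1 ++ ['.'] ++
                        PySem.Int.toChars q.1]) := by
          intro acc2
          induction PySem.List.enumerate (PySem.Chars.splitOn p.2 ['^']) 1 generalizing acc2 with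
          | nil => simp
          | cons q qs ihq =>
            simp only [List.foldl_cons, List.flatMap_cons]
            rw [ihq, ← List.append_assoc]
            congr 1
            by_cases h2 : PySem.Chars.isIn ['&'] q.2
            · simp only [if_pos h2]
              rw [PySem.List.foldl_append_singleton_eq_map]
            · simp [h2]
        rw [step]
      · simp [h1]

theorem hl7_extract_paths_eq (segment : String) :
    hl7_extract_paths segment = hl7_extract_paths_alt segment := by
  unfold hl7_extract_paths hl7_extract_paths_alt
  simp only []
  rw [hl7_foldl_eq_flatMap]
  simp

-- ===== VERDICT (by name: the statement is the Claim_ definition above) =====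
theorem hl7_extract_paths_spec : Claim_equal_hl7_extract_paths := by
  intro segment _
  unfold Spec_hl7_extract_paths
  exact hl7_extract_paths_eq segment
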